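-- pv_equiv track=rewrite | github.com/oppia/oppia | scripts/release_scripts/update_changelog_and_credits.py | remove_repetition_from_changelog
-- ===== SOURCE A (Python) =====
-- from typing import Final, List
--
-- def remove_repetition_from_changelog(
--     current_release_version_number: str,
--     previous_release_version: str,
--     changelog_lines: List[str]
-- ) -> List[str]:
--     """Removes information about current version from changelog before
--     generation of changelog again.
--
--     Args:
--         current_release_version_number: str. The current release version.
--         previous_release_version: str. The previous release version.
--         changelog_lines: List[str]. The lines of changelog file.
--
--     Returns:
--         list(str). Changelog lines with no information on current release
--         version.
--     """
--     current_version_start = 0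
--     previous_version_start = 0
--     for index, line in enumerate(changelog_lines):
--         if 'v%s' % current_release_version_number in line:
--             current_version_start = index
--         if 'v%s' % previous_release_version in line:
--             previous_version_start = index
--     changelog_lines[current_version_start:previous_version_start] = []
--     return changelog_lines
-- ===== SOURCE B (Python) =====
-- from typing import List
--
--
-- def remove_repetition_from_changelog(
--     current_release_version_number: str,
--     previous_release_version: str,
--     changelog_lines: List[str]
-- ) -> List[str]:
--     """Single backward scan: the first hit from the end is the last forward
--     hit, and the loop stops as soon as both markers have been found."""
--     current_marker = 'v%s' % current_release_version_number
--     previous_marker = 'v%s' % previous_release_version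
--     current_version_start = 0
--     previous_version_start = 0
--     current_found = False
--     previous_found = False
--     index = len(changelog_lines)
--     for line in reversed(changelog_lines):
--         if current_found and previous_found:
--             break
--         index -= 1
--         if not current_found and current_marker in line:
--             current_version_start = index
--             current_found = True
--         if not previous_found and previous_marker in line:
--             previous_version_start = index
--             previous_found = True
--     changelog_lines[current_version_start:previous_version_start] = []
--     return changelog_lines
-- ===== Notes on version B (the rewrite author's own statement) =====
-- stated objective: faster
-- what changed: B scans the changelog backwards once, records the first reverse hit for each marker (equal to A's last forward hit) and breaks as soon as both markers are found, instead of A's full forward scan that keeps overwriting both indices on every match.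
import Mathlib
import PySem

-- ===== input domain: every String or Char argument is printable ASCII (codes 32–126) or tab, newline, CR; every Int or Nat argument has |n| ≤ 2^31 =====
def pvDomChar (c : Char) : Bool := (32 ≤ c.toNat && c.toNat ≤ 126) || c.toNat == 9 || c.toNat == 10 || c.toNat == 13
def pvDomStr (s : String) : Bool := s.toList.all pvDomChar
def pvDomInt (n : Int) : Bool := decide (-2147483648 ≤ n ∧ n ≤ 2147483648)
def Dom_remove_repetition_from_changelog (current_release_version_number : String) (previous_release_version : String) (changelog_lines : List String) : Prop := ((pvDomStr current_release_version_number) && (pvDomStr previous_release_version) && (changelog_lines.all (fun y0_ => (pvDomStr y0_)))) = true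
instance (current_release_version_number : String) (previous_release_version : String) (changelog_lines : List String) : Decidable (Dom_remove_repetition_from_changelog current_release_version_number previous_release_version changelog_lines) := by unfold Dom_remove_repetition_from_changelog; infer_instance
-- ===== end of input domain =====

-- B replaces A's full forward scan by one backward scan that breaks once both markers are found
-- (same return value; A mutates its list argument in place, B performs the same mutation, and the
-- equivalence proved here is about the return value).

-- ===== PORT A =====
-- one step of A's forward loop body (both ifs, in order)
def pvStepA (mc mp : String) (st : Int × Int) (p : Int × String) : Int × Int :=
  let st1 := if PySem.Str.isIn mc p.2 then (p.1, st.2) else st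
  if PySem.Str.isIn mp p.2 then (st1.1, p.1) else st1

def remove_repetition_from_changelog (current_release_version_number : String) (previous_release_version : String) (changelog_lines : List String) : List String :=
  let mc := "v" ++ current_release_version_number
  let mp := "v" ++ previous_release_version
  let st := (PySem.List.enumerate changelog_lines 0).foldl (pvStepA mc mp) (0, 0)
  -- changelog_lines[cs:ps] = [] deletes the slice [cs, max cs ps): exact here since cs, ps ≥ 0
  PySem.List.slice changelog_lines none (some st.1) ++ PySem.List.slice changelog_lines (some (max st.1 st.2)) none

-- ===== PORT B =====
-- B's backward loop: `for line in reversed(lines)` with the break and the two found flags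
def pvRevScan (mc mp : String) : List String → Int → (Int × Bool) → (Int × Bool) → Int × Int
  | [], _, cst, pst => (cst.1, pst.1)
  | line :: rest, idx, cst, pst =>
    if cst.2 && pst.2 then (cst.1, pst.1)
    else
      let idx' := idx - 1
      let cst' := if !cst.2 && PySem.Str.isIn mc line then (idx', true) else cst
      let pst' := if !pst.2 && PySem.Str.isIn mp line then (idx', true) else pst
      pvRevScan mc mp rest idx' cst' pst'

def remove_repetition_from_changelog_alt (current_release_version_number : String) (previous_release_version : String) (changelog_lines : List String) : List String :=
  let mc := "v" ++ current_release_version_number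
  let mp := "v" ++ previous_release_version
  let st := pvRevScan mc mp changelog_lines.reverse (changelog_lines.length : Int) (0, false) (0, false)
  -- same in-place slice deletion as A: lines[:cs] + lines[max(cs,ps):]
  PySem.List.slice changelog_lines none (some st.1) ++ PySem.List.slice changelog_lines (some (max st.1 st.2)) none

-- ===== PRECONDITION & SPEC =====
def Spec_remove_repetition_from_changelog (current_release_version_number : String) (previous_release_version : String) (changelog_lines : List String) (out : List String) : Prop := out = remove_repetition_from_changelog_alt current_release_version_number previous_release_version changelog_lines
instance (current_release_version_number : String) (previous_release_version : String) (changelog_lines : List String) (out : List String) : Decidable (Spec_remove_repetition_from_changelog current_release_version_number previous_release_version changelog_lines out) := by unfold Spec_remove_repetition_from_changelog; infer_instance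

-- ===== CLAIM (what is proved, stated in full; the proofs are below) =====
def Claim_equal_remove_repetition_from_changelog : Prop := ∀ (current_release_version_number : String) (previous_release_version : String) (changelog_lines : List String), Dom_remove_repetition_from_changelog current_release_version_number previous_release_version changelog_lines → Spec_remove_repetition_from_changelog current_release_version_number previous_release_version changelog_lines (remove_repetition_from_changelog current_release_version_number previous_release_version changelog_lines)

-- ===== LEMMAS AND PROOFS =====

-- index of the LAST line containing m, as an Int, with default d
def pvLast (m : String) (ls : List String) (d : Int) : Int :=
  match ls.reverse.findIdx? (fun l => PySem.Chars.isIn m.toList l.toList) with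
  | some k => (ls.length : Int) - 1 - (k : Int)
  | none => d

theorem pvShift (o : Option Nat) (n d : Int) (f : Nat → Nat) (hf : ∀ i, f i = i + 1) :
    (match o.map f with
     | some k => n - (k : Int)
     | none => d)
      = match o with
        | some k => n - 1 - (k : Int)
        | none => d := by
  cases o <;> simp [hf]; push_cast; ring

theorem pvLast_append (m : String) (l : List String) (x : String) (d : Int) :
    pvLast m (l ++ [x]) d
      = if PySem.Chars.isIn m.toList x.toList then (l.length : Int) else pvLast m l d := by
  simp only [pvLast, List.reverse_append, List.reverse_cons, List.reverse_nil, List.nil_append,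
    List.cons_append, List.findIdx?_cons, List.length_append, List.length_cons, List.length_nil]
  by_cases h : PySem.Chars.isIn m.toList x.toList
  · simp [h]
  · simp only [h, Bool.false_eq_true, if_false]
    rw [pvShift _ _ _ _ (fun i => rfl)]
    cases hk : List.findIdx? (fun l => PySem.Chars.isIn m.toList l.toList) l.reverse <;> simp

theorem pvFwd (mc mp : String) (ls : List String) (cs ps : Int) :
    (PySem.List.enumerate ls 0).foldl (pvStepA mc mp) (cs, ps)
      = (pvLast mc ls cs, pvLast mp ls ps) := by
  induction ls using List.reverseRecOn generalizing cs ps with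
  | nil => simp [PySem.List.enumerate, pvLast]
  | append_singleton l x ih =>
    rw [PySem.List.enumerate_append]
    simp only [List.foldl_append, ih]
    simp only [PySem.List.enumerate, List.foldl_cons, List.foldl_nil]
    rw [pvLast_append, pvLast_append]
    simp only [pvStepA, PySem.Str.isIn]
    by_cases hc : PySem.Chars.isIn mc.toList x.toList <;>
      by_cases hp : PySem.Chars.isIn mp.toList x.toList <;>
      simp [hc, hp]

theorem pvRev (mc mp : String) (rls : List String) (idx cs ps : Int) (cf pf : Bool) :
    pvRevScan mc mp rls idx (cs, cf) (ps, pf)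
      = ((if cf then cs else
            match rls.findIdx? (fun l => PySem.Chars.isIn mc.toList l.toList) with
            | some k => idx - 1 - (k : Int)
            | none => cs),
         (if pf then ps else
            match rls.findIdx? (fun l => PySem.Chars.isIn mp.toList l.toList) with
            | some k => idx - 1 - (k : Int)
            | none => ps)) := by
  induction rls generalizing idx cs ps cf pf with
  | nil => cases cf <;> cases pf <;> simp [pvRevScan]
  | cons line rest ih =>
    by_cases hb : (cf && pf) = true
    · have hcf : cf = true := by revert hb; cases cf <;> cases pf <;> simp
      have hpf : pf = true := by revert hb; cases cf <;> cases pf <;> simp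
      simp [pvRevScan, hcf, hpf]
    · simp only [pvRevScan]
      rw [if_neg (by simpa using hb), ih]
      simp only [List.findIdx?_cons, PySem.Str.isIn]
      cases cf <;> cases pf <;>
        by_cases hc : PySem.Chars.isIn mc.toList line.toList <;>
        by_cases hp : PySem.Chars.isIn mp.toList line.toList <;>
        simp only [hc, hp, Bool.not_true, Bool.not_false, Bool.false_eq_true] <;>
        (try simp_all) <;>
        (try constructor) <;>
        (first
          | rfl
          | rw [pvShift _ _ _ _ (fun i => rfl)])

theorem pvScan_eq (mc mp : String) (ls : List String) :
    (PySem.List.enumerate ls 0).foldl (pvStepA mc mp) (0, 0)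
      = pvRevScan mc mp ls.reverse (ls.length : Int) (0, false) (0, false) := by
  rw [pvFwd, pvRev]
  simp only [pvLast, List.reverse_reverse]
  rfl

-- ===== VERDICT (by name: the statement is the Claim_ definition above) =====
theorem remove_repetition_from_changelog_spec : Claim_equal_remove_repetition_from_changelog := by
  intro c p ls _
  show _ = _
  simp only [remove_repetition_from_changelog, remove_repetition_from_changelog_alt, pvScan_eq]
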